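-- pv_equiv track=rewrite | github.com/theColorfulRainbow/videocapture | TestingEnvironment/website/flaskblog/flaskblog/integration.py | is_valid_topics
-- ===== SOURCE A (Python) =====
-- def is_valid_topics(topic_string):
--     try:
--         # remove all whitespace
--         topic_string = topic_string.replace(" ", "")
--         print (topic_string)
--         # make sure it goes: 1 number then 1 comma
--         topic_list = [int(s) for s in topic_string.split(',')]
--         print (topic_string)
--         print ('Sorted List: {}'.format(sorted(topic_list)))
--         # check topic_list is in ascending order
--         if not(topic_list == sorted(topic_list)):
--             return False
--         # check all
--         return True
--     except:
--         return False
-- ===== SOURCE B (Python) =====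
-- def is_valid_topics(topic_string):
--     try:
--         # remove all whitespace (same parsing as before)
--         topic_string = topic_string.replace(" ", "")
--         print (topic_string)
--         topic_list = [int(s) for s in topic_string.split(',')]
--         print (topic_string)
--         print ('Sorted List: {}'.format(sorted(topic_list)))
--         # ascending check: one left-to-right scan, no sorted copy compared
--         prev = None
--         for x in topic_list:
--             if prev is not None and x < prev:
--                 return False
--             prev = x
--         return True
--     except:
--         return False
-- ===== Notes on version B (the rewrite author's own statement) =====
-- stated objective: simpler
-- what changed: Replaces the compare-with-a-sorted-copy ascending test by a single left-to-right scan that fails as soon as an element is strictly below its predecessor; parsing and the print statements (including the sorted-list debug print) are kept so stdout is identical.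
import Mathlib
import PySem

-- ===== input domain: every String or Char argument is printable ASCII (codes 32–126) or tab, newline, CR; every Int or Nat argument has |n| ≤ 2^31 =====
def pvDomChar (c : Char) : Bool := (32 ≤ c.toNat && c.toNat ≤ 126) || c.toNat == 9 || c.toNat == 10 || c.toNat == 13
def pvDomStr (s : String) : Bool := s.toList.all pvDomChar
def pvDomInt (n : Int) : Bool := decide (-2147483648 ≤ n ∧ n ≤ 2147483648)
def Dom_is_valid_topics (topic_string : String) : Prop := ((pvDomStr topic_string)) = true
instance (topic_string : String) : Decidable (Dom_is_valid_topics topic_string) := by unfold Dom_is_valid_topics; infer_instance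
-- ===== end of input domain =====

-- B keeps A's parsing and prints (stdout identical; prints are side effects not modelled here)
-- but replaces the 'list == sorted(list)' test with one left-to-right predecessor scan.

-- ===== PORT A =====
-- parse: topic_string.replace(" ","").split(',') then int() each part; none = some part raises ValueError
def pvParseTopics (topic_string : String) : Option (List Int) :=
  (PySem.Chars.splitOn (PySem.Str.replace topic_string " " "").toList [',']).mapM PySem.Int.ofChars?

def is_valid_topics (topic_string : String) : Bool :=
  match pvParseTopics topic_string with
  | none => false                                -- except: return False
  | some topic_list =>
      if !(topic_list == PySem.List.sorted topic_list (fun x => x) false) then false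
      else true

-- ===== PORT B =====
-- the for-loop of Source B with accumulator prev : Option Int
def pvAscScan (prev : Option Int) : List Int → Bool
  | [] => true
  | x :: rest =>
      if (match prev with | some p => decide (x < p) | none => false) then false
      else pvAscScan (some x) rest

def is_valid_topics_alt (topic_string : String) : Bool :=
  match pvParseTopics topic_string with
  | none => false                                -- except: return False
  | some topic_list => pvAscScan none topic_list

-- ===== PRECONDITION & SPEC =====
def Spec_is_valid_topics (topic_string : String) (out : Bool) : Prop := out = is_valid_topics_alt topic_string
instance (topic_string : String) (out : Bool) : Decidable (Spec_is_valid_topics topic_string out) := by unfold Spec_is_valid_topics; infer_instance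

-- ===== CLAIM (what is proved, stated in full; the proofs are below) =====
def Claim_equal_is_valid_topics : Prop := ∀ (topic_string : String), Dom_is_valid_topics topic_string → Spec_is_valid_topics topic_string (is_valid_topics topic_string)

-- ===== LEMMAS AND PROOFS =====
theorem pvAscScan_some (p : Int) (l : List Int) :
    pvAscScan (some p) l = decide (List.IsChain (· ≤ ·) (p :: l)) := by
  induction l generalizing p with
  | nil => simp [pvAscScan]
  | cons x rest ih =>
      simp only [pvAscScan, ih x, List.isChain_cons_cons]
      by_cases h : x < p
      · simp [h, not_le.mpr h]
      · simp [h, not_lt.mp h]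

theorem pvAscScan_none (l : List Int) :
    pvAscScan none l = decide (List.IsChain (· ≤ ·) l) := by
  cases l with
  | nil => simp [pvAscScan]
  | cons x rest => simpa [pvAscScan, List.isChain_cons] using pvAscScan_some x rest

theorem sorted_check_eq_scan (l : List Int) :
    (if !(l == PySem.List.sorted l (fun x => x) false) then false else true)
      = pvAscScan none l := by
  rw [pvAscScan_none]
  by_cases h : l.Pairwise (· ≤ ·)
  · have hs := PySem.List.sorted_eq_self_of_pairwise l (fun x => x) (by simpa using h)
    have hc : List.IsChain (fun x1 x2 : Int => x1 ≤ x2) l := List.isChain_iff_pairwise.mpr h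
    simp [hs, hc]
  · have hc : ¬ List.IsChain (fun x1 x2 : Int => x1 ≤ x2) l :=
      fun hc => h (List.isChain_iff_pairwise.mp hc)
    have hne : l ≠ PySem.List.sorted l (fun x => x) false := by
      intro he
      exact h (by simpa using he ▸ PySem.List.sorted_pairwise l (fun x => x))
    simp [hc, hne]

-- ===== VERDICT (by name: the statement is the Claim_ definition above) =====
theorem is_valid_topics_spec : Claim_equal_is_valid_topics := by
  intro s _
  unfold Spec_is_valid_topics is_valid_topics is_valid_topics_alt
  cases pvParseTopics s with
  | none => rfl
  | some l => exact sorted_check_eq_scan l
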